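-- pv_equiv track=rewrite | github.com/devsangwoo/algo-practice | Week18/개인문제 18-5.py | solution
-- ===== SOURCE A (Python) =====
-- def solution(land):
--     #각 행에서 최대, 차대를 구해서 최대의 행에는 차대, 나머지는 최대 더해주면서 내려가기
--     for i in range(1,len(land)):
--         # 최대 행의 번호 찾기
--         col = land[i-1].index(max(land[i-1]))
--
--         land[i-1].sort()
--         one = land[i-1][3]
--         two = land[i-1][2]
--
--         for j in range(4):
--             if col == j:
--                 land[i][j] = land[i][j] + two
--             else:
--                 land[i][j] = land[i][j] + one
--     answer = max(land[-1])
--     return answer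
-- ===== SOURCE B (Python) =====
-- def solution(land):
--     # Same row-by-row descent, but each cell takes land[i][j] plus the max of the
--     # other three columns of the previous accumulated row, found by a direct scan
--     # (no sort / argmax special-casing). Return-value equivalent; mutates land
--     # in place like A does, though unlike A it does not sort earlier rows.
--     for i in range(1, len(land)):
--         prev = land[i - 1]
--         land[i] = [land[i][j] + max(prev[k] for k in range(4) if k != j)
--                    for j in range(4)]
--     return max(land[-1])
-- ===== Notes on version B (the rewrite author's own statement) =====
-- stated objective: simpler
-- what changed: Replaces A's per-row sort plus argmax special-casing (sort previous row, take top-two, add second-max only at the argmax column) with a direct per-cell scan taking the max of the other three columns of the previous accumulated row; return-value equivalent (both mutate land in place, but B does not sort earlier rows).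
-- outside the precondition, e.g. on solution([[1, 2, 3, 4, 5], [1, 2, 3, 4, 5]]): A returns 8, B returns 7
import Mathlib
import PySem

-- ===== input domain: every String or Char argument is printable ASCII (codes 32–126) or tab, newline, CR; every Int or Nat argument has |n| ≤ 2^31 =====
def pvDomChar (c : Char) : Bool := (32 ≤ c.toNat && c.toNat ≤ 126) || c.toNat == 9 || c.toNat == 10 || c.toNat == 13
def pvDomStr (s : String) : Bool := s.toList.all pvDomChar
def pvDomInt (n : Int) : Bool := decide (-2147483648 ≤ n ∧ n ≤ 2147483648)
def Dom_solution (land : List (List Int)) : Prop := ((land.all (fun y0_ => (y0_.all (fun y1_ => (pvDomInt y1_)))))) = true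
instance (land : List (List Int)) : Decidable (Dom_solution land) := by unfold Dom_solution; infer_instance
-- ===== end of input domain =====

-- B keeps A's row-by-row descent but replaces the sort/argmax trick by a direct
-- scan of the other three columns per cell (objective: simpler). A sorts earlier
-- rows of `land` in place; only the RETURN VALUE is proved equal (B also mutates
-- `land` in place, but does not sort rows).


-- ===== PORT A =====
-- one pass of A's loop body for row i: prev = land[i-1] (read before being
-- sorted, exactly as A does), cur = land[i]; the `.getD 0` defaults are dead
-- under Pre_solution (rows nonempty / length 4), where Python would raise.
def solutionRowA (prev cur : List Int) : List Int :=
  let m := (PySem.List.max? prev (fun v => v)).getD 0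
  let col : Int := ((PySem.List.index? prev m).getD 0 : Nat)
  let srt := PySem.List.sorted prev (fun v => v) false
  let one := PySem.List.pyGetD srt 3 0
  let two := PySem.List.pyGetD srt 2 0
  (PySem.List.pyRange 0 4 1).foldl
    (fun c j => PySem.List.pySetD c j (PySem.List.pyGetD c j 0 + (if col == j then two else one))) cur

-- A's `for i in range(1, len(land))`: each step consumes the next row; the
-- carried `prev` is the fully accumulated previous row, and at the end
-- `max(land[-1])` is the max of the last accumulated row.
def solutionGoA (prev : List Int) : List (List Int) → Int
  | [] => (PySem.List.max? prev (fun v => v)).getD 0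
  | cur :: rest => solutionGoA (solutionRowA prev cur) rest

def solution (land : List (List Int)) : Int :=
  match land with
  | [] => 0           -- Python raises IndexError here; excluded by Pre_solution
  | r :: rest => solutionGoA r rest

-- ===== PORT B =====
-- B's comprehension: cell j of the new row = land[i][j] + max of the other
-- three columns of the previous accumulated row.
def solutionRowB (prev cur : List Int) : List Int :=
  (PySem.List.pyRange 0 4 1).map
    (fun j => PySem.List.pyGetD cur j 0 +
      (PySem.List.max? ((PySem.List.pyRange 0 4 1).filterMap
         (fun k => if k ≠ j then some (PySem.List.pyGetD prev k 0) else none)) (fun v => v)).getD 0)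

def solutionGoB (prev : List Int) : List (List Int) → Int
  | [] => (PySem.List.max? prev (fun v => v)).getD 0
  | cur :: rest => solutionGoB (solutionRowB prev cur) rest

def solution_alt (land : List (List Int)) : Int :=
  match land with
  | [] => 0           -- Python raises IndexError here; excluded by Pre_solution
  | r :: rest => solutionGoB r rest

-- ===== PRECONDITION & SPEC =====
-- Pre_ restricts to the puzzle's natural domain: a nonempty N×4 land grid (a
-- single row of any nonzero width is also admitted, since no descent happens
-- and both programs just return its max). It therefore excludes multi-row
-- grids with a row of 5+ columns, on which A still returns a value computed
-- from its fixed 4-column assumption (sorted[3]/sorted[2] are then not the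
-- top-two values); A raises IndexError on every other excluded input.
def Pre_solution (land : List (List Int)) : Prop :=
  land ≠ [] ∧
    ((land.length = 1 ∧ ∀ r ∈ land, r ≠ []) ∨ ∀ r ∈ land, r.length = 4)
instance (land : List (List Int)) : Decidable (Pre_solution land) := by
  unfold Pre_solution; infer_instance
def pvWitness_solution : List (List Int) := [[1, 2, 3, 4], [4, 3, 2, 1], [0, 5, 0, 5]]
def Spec_solution (land : List (List Int)) (out : Int) : Prop := out = solution_alt land
instance (land : List (List Int)) (out : Int) : Decidable (Spec_solution land out) := by unfold Spec_solution; infer_instance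

-- ===== CLAIM (what is proved, stated in full; the proofs are below) =====
def Claim_equal_solution : Prop := ∀ (land : List (List Int)), Dom_solution land → Pre_solution land → Spec_solution land (solution land)

-- ===== LEMMAS AND PROOFS =====

-- max of a 3-element list, from its position in a sorted permutation
lemma pv_max3_of_perm (s0 s1 s2 x y z : Int) (h01 : s0 ≤ s1) (h12 : s1 ≤ s2)
    (hp : [s0, s1, s2].Perm [x, y, z]) : s2 = max x (max y z) := by
  have hx : x ∈ [s0, s1, s2] := hp.mem_iff.2 (by simp)
  have hy : y ∈ [s0, s1, s2] := hp.mem_iff.2 (by simp)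
  have hz : z ∈ [s0, s1, s2] := hp.mem_iff.2 (by simp)
  have hs : s2 ∈ [x, y, z] := hp.mem_iff.1 (by simp)
  simp at hx hy hz hs
  omega

-- the semantic core: on a width-4 previous row, "second max at the argmax
-- column, max elsewhere" (A) coincides with "max of the other three" (B)
set_option maxRecDepth 4096 in
lemma pv_row_eq (a b c d w x y z : Int) :
    solutionRowA [a, b, c, d] [w, x, y, z] = solutionRowB [a, b, c, d] [w, x, y, z] := by
  obtain ⟨s0, s1, s2, s3, hs⟩ : ∃ s0 s1 s2 s3,
      PySem.List.sorted [a,b,c,d] (fun v => v) = [s0,s1,s2,s3] := by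
    rcases h : PySem.List.sorted [a,b,c,d] (fun v => v) with _ | ⟨s0, _ | ⟨s1, _ | ⟨s2, _ | ⟨s3, _ | ⟨s4, t⟩⟩⟩⟩⟩ <;>
      first
      | (exact ⟨_, _, _, _, rfl⟩)
      | (have := congrArg List.length h; simp [PySem.List.length_sorted] at this)
  have hperm : ([s0,s1,s2,s3] : List Int).Perm [a,b,c,d] := by
    rw [← hs]; exact PySem.List.sorted_perm _ _ _
  have hpw : ([s0,s1,s2,s3] : List Int).Pairwise (fun u v => u ≤ v) := by
    rw [← hs]; exact PySem.List.sorted_pairwise _ _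
  simp [List.pairwise_cons] at hpw
  obtain ⟨⟨h01, h02, h03⟩, ⟨h12, h13⟩, h23⟩ := hpw
  have hAm : a ∈ [s0,s1,s2,s3] := hperm.mem_iff.2 (by simp)
  have hBm : b ∈ [s0,s1,s2,s3] := hperm.mem_iff.2 (by simp)
  have hCm : c ∈ [s0,s1,s2,s3] := hperm.mem_iff.2 (by simp)
  have hDm : d ∈ [s0,s1,s2,s3] := hperm.mem_iff.2 (by simp)
  have hs3m : s3 ∈ [a,b,c,d] := hperm.mem_iff.1 (by simp)
  simp at hAm hBm hCm hDm hs3m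
  have h2 : ([s0,s1,s2,s3] : List Int).Perm (s3 :: [s0,s1,s2]) :=
    List.perm_append_singleton s3 [s0,s1,s2]
  simp only [solutionRowA, solutionRowB]
  have hr : PySem.List.pyRange 0 4 1 = [0,1,2,3] := by decide
  rw [hr]
  simp [List.foldl, PySem.List.pySetD, PySem.List.pySet?, PySem.List.pyGetD, PySem.List.pyGet?,
        PySem.List.pyIdx?, PySem.List.max?_id_cons, List.foldl, hs]
  set M := max a (max b (max c d)) with hMdef
  have hs3M : s3 = M := by omega
  by_cases ha : a = M
  · have hidx : List.idxOf? M [a,b,c,d] = some 0 := by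
      simp [List.idxOf?_cons, ← ha]
    have htail : ([s0,s1,s2] : List Int).Perm [b,c,d] := by
      have h3 : (s3 :: [s0,s1,s2] : List Int).Perm (a :: [b,c,d]) := h2.symm.trans hperm
      rw [show s3 = a by omega] at h3
      exact h3.cons_inv
    rw [hidx]
    norm_num
    refine ⟨pv_max3_of_perm s0 s1 s2 b c d h01 h12 htail, by omega, by omega, by omega⟩
  · by_cases hb : b = M
    · have hidx : List.idxOf? M [a,b,c,d] = some 1 := by
        simp [List.idxOf?_cons, ← hb]
        omega
      have htail : ([s0,s1,s2] : List Int).Perm [a,c,d] := by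
        have hsw : ([a,b,c,d] : List Int).Perm (b :: [a,c,d]) := List.Perm.swap b a [c,d]
        have h3 : (s3 :: [s0,s1,s2] : List Int).Perm (b :: [a,c,d]) :=
          h2.symm.trans (hperm.trans hsw)
        rw [show s3 = b by omega] at h3
        exact h3.cons_inv
      rw [hidx]
      norm_num
      refine ⟨by omega, pv_max3_of_perm s0 s1 s2 a c d h01 h12 htail, by omega, by omega⟩
    · by_cases hc : c = M
      · have hidx : List.idxOf? M [a,b,c,d] = some 2 := by
          simp [List.idxOf?_cons, ← hc]
          rw [if_neg (show ¬a = c by omega), if_neg (show ¬b = c by omega)]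
          rfl
        have htail : ([s0,s1,s2] : List Int).Perm [a,b,d] := by
          have hsw : ([a,b,c,d] : List Int).Perm (c :: [a,b,d]) :=
            (List.Perm.cons a (List.Perm.swap c b [d])).trans (List.Perm.swap c a [b,d])
          have h3 : (s3 :: [s0,s1,s2] : List Int).Perm (c :: [a,b,d]) :=
            h2.symm.trans (hperm.trans hsw)
          rw [show s3 = c by omega] at h3
          exact h3.cons_inv
        rw [hidx]
        norm_num
        refine ⟨by omega, by omega, pv_max3_of_perm s0 s1 s2 a b d h01 h12 htail, by omega⟩
      · have hd : d = M := by omega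
        have hidx : List.idxOf? M [a,b,c,d] = some 3 := by
          simp [List.idxOf?_cons, ← hd]
          rw [if_neg (show ¬a = d by omega), if_neg (show ¬b = d by omega),
              if_neg (show ¬c = d by omega)]
          rfl
        have htail : ([s0,s1,s2] : List Int).Perm [a,b,c] := by
          have hsw : ([a,b,c,d] : List Int).Perm (d :: [a,b,c]) :=
            List.perm_append_singleton d [a,b,c]
          have h3 : (s3 :: [s0,s1,s2] : List Int).Perm (d :: [a,b,c]) :=
            h2.symm.trans (hperm.trans hsw)
          rw [show s3 = d by omega] at h3
          exact h3.cons_inv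
        rw [hidx]
        norm_num
        refine ⟨by omega, by omega, by omega, pv_max3_of_perm s0 s1 s2 a b c h01 h12 htail⟩

lemma pv_lengthRowB (prev cur : List Int) : (solutionRowB prev cur).length = 4 := by
  simp [solutionRowB]

lemma pv_go_eq : ∀ (rest : List (List Int)) (prev : List Int), prev.length = 4 →
    (∀ r ∈ rest, r.length = 4) → solutionGoA prev rest = solutionGoB prev rest := by
  intro rest
  induction rest with
  | nil => intro prev _ _; rfl
  | cons cur rest ih =>
    intro prev hp hr
    obtain ⟨a, b, c, d, hprev⟩ : ∃ a b c d, prev = [a, b, c, d] := by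
      rcases prev with _ | ⟨a, _ | ⟨b, _ | ⟨c, _ | ⟨d, _ | ⟨e, t⟩⟩⟩⟩⟩ <;>
        simp_all
    obtain ⟨w, x, y, z, hcur⟩ : ∃ w x y z, cur = [w, x, y, z] := by
      have := hr cur (by simp)
      rcases cur with _ | ⟨a, _ | ⟨b, _ | ⟨c, _ | ⟨d, _ | ⟨e, t⟩⟩⟩⟩⟩ <;>
        simp_all
    subst hprev hcur
    show solutionGoA (solutionRowA _ _) rest = solutionGoB (solutionRowB _ _) rest
    rw [pv_row_eq]
    exact ih _ (pv_lengthRowB _ _) (fun r h => hr r (by simp [h]))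

-- ===== VERDICT (by name: the statement is the Claim_ definition above) =====
theorem solution_spec : Claim_equal_solution := by
  intro land _ hpre
  obtain ⟨hne, hshape⟩ := hpre
  unfold Spec_solution
  rcases land with _ | ⟨r, rest⟩
  · exact absurd rfl hne
  rcases hshape with ⟨h1, _⟩ | h4
  · rcases rest with _ | ⟨s, t⟩
    · rfl
    · simp at h1
  · exact pv_go_eq rest r (h4 r (by simp)) (fun s hs => h4 s (by simp [hs]))
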